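-- pv_equiv track=rewrite | github.com/samfrances/coding-challenges | codewars/5kyu/decode_the_morse_code_advanced.py | transmission_rate
-- ===== SOURCE A (Python) =====
-- def transmission_rate(bits):
--     shortest_run = len(bits)
--     current_run = 1
--     prev_bit = bits[0]
--     for bit in bits[1:]:
--         if bit == prev_bit:
--             current_run += 1
--         else:
--             shortest_run = min(shortest_run, current_run)
--             current_run = 1
--         prev_bit = bit
--     return shortest_run
-- ===== SOURCE B (Python) =====
-- def transmission_rate(bits):
--     # Phase 1: build the run-length table in one pass.
--     groups = []  # one [char, run_length] entry per run, in order
--     for b in bits: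
--         if groups and groups[-1][0] == b:
--             groups[-1][1] += 1
--         else:
--             groups.append([b, 1])
--     # Phase 2: reduce. The last entry is the final (never-closed) run, which A
--     # skips, so it is dropped; len(bits) is the initial bound.
--     return min([len(bits)] + [n for _, n in groups[:-1]])
-- ===== Notes on version B (the rewrite author's own statement) =====
-- stated objective: alternative
-- what changed: B first builds the complete run-length table in one pass, then takes the minimum over that table (skipping the final run, as A does) in a separate reduction, instead of A's single pass maintaining a running minimum.
-- crash fix: On the empty string A raises IndexError (bits[0]); B returns 0 (min of [len(bits)] with no runs). — e.g. on transmission_rate(""): A raises IndexError, B returns 0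
import Mathlib
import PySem

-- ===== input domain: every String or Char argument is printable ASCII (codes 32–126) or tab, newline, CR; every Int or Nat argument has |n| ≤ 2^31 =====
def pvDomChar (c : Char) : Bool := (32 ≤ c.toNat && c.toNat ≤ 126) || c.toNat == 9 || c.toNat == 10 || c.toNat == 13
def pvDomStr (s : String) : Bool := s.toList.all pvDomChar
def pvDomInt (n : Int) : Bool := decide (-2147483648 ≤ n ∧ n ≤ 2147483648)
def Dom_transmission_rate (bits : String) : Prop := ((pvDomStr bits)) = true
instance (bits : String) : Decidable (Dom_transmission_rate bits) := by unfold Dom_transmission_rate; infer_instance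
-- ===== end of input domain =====

-- B builds the full run-length table in one pass and then reduces it, instead of A's
-- running-minimum pass; same O(n) cost, different decomposition (objective: alternative).

-- ===== PORT A =====
-- 'bits[0]' raises IndexError on the empty string: that input is outside Pre_.
def transmission_rate (bits : String) : Int :=
  match bits.toList with
  | [] => 0  -- unreachable under Pre_ (Python raises IndexError here)
  | p :: rest =>
    -- state = (shortest_run, current_run, prev_bit); loop over bits[1:]
    (rest.foldl
      (fun (st : Int × Int × Char) bit =>
        if bit = st.2.2 then (st.1, st.2.1 + 1, bit)
        else (min st.1 st.2.1, 1, bit))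
      (PySem.Str.len bits, 1, p)).1

-- ===== PORT B =====
-- one loop iteration of Source B: extend the last run of the table, or open a new one
def pvStep (g : List (Char × Int)) (b : Char) : List (Char × Int) :=
  match g.getLast? with
  | some (c, n) => if c = b then g.dropLast ++ [(b, n + 1)] else g ++ [(b, 1)]
  | none => [(b, 1)]

def transmission_rate_alt (bits : String) : Int :=
  let groups := bits.toList.foldl pvStep []
  -- min([len(bits)] + [n for _, n in groups[:-1]])
  (groups.dropLast.map Prod.snd).foldl min (PySem.Str.len bits)

-- ===== PRECONDITION & SPEC =====
def Pre_transmission_rate (bits : String) : Prop := bits ≠ ""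
instance (bits : String) : Decidable (Pre_transmission_rate bits) := by
  unfold Pre_transmission_rate; infer_instance
def pvWitness_transmission_rate : String := "0010"

-- On the empty string A raises IndexError (bits[0]); B returns 0 (min of [len(bits)] with no runs).
def Raises_transmission_rate (bits : String) : Prop := bits = ""
instance (bits : String) : Decidable (Raises_transmission_rate bits) := by
  unfold Raises_transmission_rate; infer_instance
def pvRaiseWitness_transmission_rate : String := ""
def pvRaiseWitnessOut_transmission_rate : Int := 0

def Spec_transmission_rate (bits : String) (out : Int) : Prop := out = transmission_rate_alt bits
instance (bits : String) (out : Int) : Decidable (Spec_transmission_rate bits out) := by unfold Spec_transmission_rate; infer_instance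

-- ===== CLAIM (what is proved, stated in full; the proofs are below) =====
def Claim_equal_transmission_rate : Prop := ∀ (bits : String), Dom_transmission_rate bits → Pre_transmission_rate bits → Spec_transmission_rate bits (transmission_rate bits)
def Claim_raises_transmission_rate : Prop := (∀ (bits : String), Dom_transmission_rate bits → Raises_transmission_rate bits → ¬ Pre_transmission_rate bits) ∧ (Dom_transmission_rate (pvRaiseWitness_transmission_rate) ∧ Raises_transmission_rate (pvRaiseWitness_transmission_rate) ∧ transmission_rate_alt (pvRaiseWitness_transmission_rate) = pvRaiseWitnessOut_transmission_rate)

-- ===== LEMMAS AND PROOFS =====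

-- the completed runs A's loop closes (as (char, length) pairs), most recent last
def pvRuns (p : Char) (c : Int) : List Char → List (Char × Int)
  | [] => []
  | b :: t => if b = p then pvRuns p (c + 1) t else (p, c) :: pvRuns b 1 t

-- the final, never-closed run
def pvLast (p : Char) (c : Int) : List Char → Char × Int
  | [] => (p, c)
  | b :: t => if b = p then pvLast p (c + 1) t else pvLast b 1 t

-- pvStep with the table reversed (most recent run first); used only to reason about pvStep
def pvStepR (g : List (Char × Int)) (b : Char) : List (Char × Int) :=
  match g with
  | (c, n) :: rest => if c = b then (b, n + 1) :: rest else (b, 1) :: (c, n) :: rest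
  | [] => [(b, 1)]

theorem pvA_foldl (t : List Char) : ∀ (s c : Int) (p : Char),
    (t.foldl (fun (st : Int × Int × Char) bit =>
        if bit = st.2.2 then (st.1, st.2.1 + 1, bit)
        else (min st.1 st.2.1, 1, bit)) (s, c, p)).1
      = ((pvRuns p c t).map Prod.snd).foldl min s := by
  induction t with
  | nil => intro s c p; simp [pvRuns]
  | cons b t ih =>
    intro s c p
    by_cases h : b = p <;> simp [pvRuns, h, List.foldl, ih]

theorem pvStep_concat (g : List (Char × Int)) (c : Char) (n : Int) (b : Char) :
    pvStep (g ++ [(c, n)]) b = if c = b then g ++ [(b, n + 1)] else (g ++ [(c, n)]) ++ [(b, 1)] := by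
  rw [pvStep.eq_def]
  simp only [List.getLast?_concat, List.dropLast_concat]

theorem pvStep_reverse (gr : List (Char × Int)) (b : Char) :
    pvStep gr.reverse b = (pvStepR gr b).reverse := by
  match gr with
  | [] => rfl
  | (c, n) :: rest =>
    simp only [List.reverse_cons, pvStep_concat, pvStepR]
    by_cases h : c = b
    · simp [h]
    · simp [h]

theorem pvFoldl_step_reverse (t : List Char) : ∀ (g : List (Char × Int)),
    t.foldl pvStep g.reverse = (t.foldl pvStepR g).reverse := by
  induction t with
  | nil => intro g; rfl
  | cons b t ih =>
    intro g
    simp only [List.foldl, pvStep_reverse, ih]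

theorem pvStepR_foldl (t : List Char) : ∀ (p : Char) (c : Int) (g : List (Char × Int)),
    t.foldl pvStepR ((p, c) :: g) = pvLast p c t :: ((pvRuns p c t).reverse ++ g) := by
  induction t with
  | nil => intro p c g; simp [pvRuns, pvLast]
  | cons b t ih =>
    intro p c g
    by_cases h : b = p
    · subst h; simp [pvStepR, pvRuns, pvLast, List.foldl, ih]
    · simp [pvStepR, pvRuns, pvLast, List.foldl, Ne.symm h, h, ih]

theorem pvB_groups (p : Char) (rest : List Char) :
    (p :: rest).foldl pvStep [] = pvRuns p 1 rest ++ [pvLast p 1 rest] := by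
  have h1 : (p :: rest).foldl pvStep [] = rest.foldl pvStep ([(p, 1)] : List (Char × Int)).reverse := rfl
  rw [h1, pvFoldl_step_reverse, pvStepR_foldl]
  simp

-- ===== VERDICT (by name: the statement is the Claim_ definition above) =====
theorem transmission_rate_spec : Claim_equal_transmission_rate := by
  intro bits _ hpre
  unfold Spec_transmission_rate transmission_rate transmission_rate_alt
  cases h : bits.toList with
  | nil => exact absurd (String.toList_eq_nil_iff.mp h) hpre
  | cons p rest =>
    simp only [pvB_groups, List.dropLast_concat, pvA_foldl]

theorem transmission_rate_raises : Claim_raises_transmission_rate := by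
  unfold Claim_raises_transmission_rate
  exact ⟨fun bits _ hr => by simp [Raises_transmission_rate, Pre_transmission_rate] at *; exact hr,
    by decide⟩

-- self-check: the crash-fix witness value re-checked from the theorem above
theorem pvRaiseWitnessOut_ok :
    transmission_rate_alt pvRaiseWitness_transmission_rate = pvRaiseWitnessOut_transmission_rate :=
  transmission_rate_raises.2.2.2
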